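-- pv_equiv track=rewrite | github.com/Nortsx/aoc2023-solutions | task_1/task_1_2.py | check_char_in_number
-- ===== SOURCE A (Python) =====
-- def check_char_in_number(number_substring):
--     numbers = ['zero', 'one', 'two', 'three', 'four', 'five', 'six', 'seven', 'eight', 'nine']
--     for index, number in enumerate(numbers):
--         if len(number_substring) > len(number):
--             continue
--         else:
--             if number_substring == number[0:len(number_substring)]:
--                 if len(number_substring) == len(number):
--                     return index
--                 else:
--                     return 10  # we have to see if match is there
--     return -1
-- ===== SOURCE B (Python) =====
-- def check_char_in_number(number_substring):
--     numbers = ['zero', 'one', 'two', 'three', 'four', 'five', 'six', 'seven', 'eight', 'nine']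
--     # pass 1: exact word match
--     if number_substring in numbers:
--         return numbers.index(number_substring)
--     # pass 2: proper-prefix match (no digit word is a prefix of another, so disjoint)
--     if any(number.startswith(number_substring) for number in numbers):
--         return 10
--     return -1
-- ===== Notes on version B (the rewrite author's own statement) =====
-- stated objective: simpler
-- what changed: Replaced A's single enumerated loop with per-word length/slice case analysis by two sequential passes: an exact membership + index lookup, then a prefix any() test returning 10, relying on the fact that no digit word is a prefix of another.
import Mathlib
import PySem

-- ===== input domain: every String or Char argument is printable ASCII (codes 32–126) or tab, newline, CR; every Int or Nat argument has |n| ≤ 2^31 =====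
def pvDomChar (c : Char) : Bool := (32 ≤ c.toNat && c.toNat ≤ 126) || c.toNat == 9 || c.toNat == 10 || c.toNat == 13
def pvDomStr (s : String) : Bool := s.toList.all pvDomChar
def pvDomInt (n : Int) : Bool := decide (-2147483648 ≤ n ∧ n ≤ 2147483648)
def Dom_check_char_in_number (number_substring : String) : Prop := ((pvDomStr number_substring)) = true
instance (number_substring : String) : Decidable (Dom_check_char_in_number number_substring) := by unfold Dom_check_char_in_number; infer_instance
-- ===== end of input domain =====

-- B replaces A's single combined loop (per-word length/slice case analysis with mixed
-- exact/prefix returns) by two sequential passes: exact membership+index, then a prefix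
-- any() test; objective: simpler.


-- ===== PORT A =====
def pvNumbersA : List String :=
  ["zero", "one", "two", "three", "four", "five", "six", "seven", "eight", "nine"]

-- the for-loop over enumerate(numbers); the string comparison
-- number_substring == number[0:len(number_substring)] is ported on code points
-- (exact: Python string equality is code-point-list equality)
def pvLoopA (s : String) : List (Int × String) → Int
  | [] => -1
  | (index, number) :: rest =>
    if PySem.Str.len s > PySem.Str.len number then
      pvLoopA s rest
    else
      if s.toList = PySem.List.slice number.toList (some 0) (some (PySem.Str.len s)) then
        if PySem.Str.len s = PySem.Str.len number then index else 10
      else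
        pvLoopA s rest

def check_char_in_number (number_substring : String) : Int :=
  pvLoopA number_substring (PySem.List.enumerate pvNumbersA)

-- ===== PORT B =====
def pvNumbersB : List String :=
  ["zero", "one", "two", "three", "four", "five", "six", "seven", "eight", "nine"]

def check_char_in_number_alt (number_substring : String) : Int :=
  if number_substring ∈ pvNumbersB then
    ((PySem.List.index? pvNumbersB number_substring).getD 0 : Nat)
  else if pvNumbersB.any (fun number => PySem.Str.startswith number number_substring) then
    10
  else
    -1

-- ===== PRECONDITION & SPEC =====
def Spec_check_char_in_number (number_substring : String) (out : Int) : Prop := out = check_char_in_number_alt number_substring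
instance (number_substring : String) (out : Int) : Decidable (Spec_check_char_in_number number_substring out) := by unfold Spec_check_char_in_number; infer_instance

-- ===== CLAIM (what is proved, stated in full; the proofs are below) =====
def Claim_equal_check_char_in_number : Prop := ∀ (number_substring : String), Dom_check_char_in_number number_substring → Spec_check_char_in_number number_substring (check_char_in_number number_substring)

-- ===== LEMMAS AND PROOFS =====

-- No digit word is a prefix of another (this is why B's exact pass and prefix pass
-- are disjoint and order-independent).
theorem pvNoPrefix :
    pvNumbersA.Pairwise
      (fun a b => ¬ a.toList <+: b.toList ∧ ¬ b.toList <+: a.toList) := by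
  decide

-- A's loop on a suffix of the word list, with enumeration offset k, computes exactly
-- B's two-pass answer on that suffix (index shifted by k).
theorem pvLoop_eq (s : String) :
    ∀ (ws : List String) (k : Int),
      ws.Pairwise (fun a b => ¬ a.toList <+: b.toList ∧ ¬ b.toList <+: a.toList) →
      pvLoopA s (PySem.List.enumerate ws k) =
        match PySem.List.index? ws s with
        | some i => k + i
        | none =>
          if ws.any (fun w => PySem.Str.startswith w s) then 10 else -1 := by
  intro ws
  induction ws with
  | nil => intro k _; simp [PySem.List.enumerate_nil, pvLoopA, PySem.List.index?]
  | cons w rest ih =>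
    intro k hp
    rw [List.pairwise_cons] at hp
    obtain ⟨hw, hrest⟩ := hp
    rw [PySem.List.enumerate_cons]
    show pvLoopA s ((k, w) :: PySem.List.enumerate rest (k + 1)) = _
    rw [pvLoopA]
    have hlen : PySem.Str.len s = (s.toList.length : Int) := PySem.Str.len_eq s
    have hlw : PySem.Str.len w = (w.toList.length : Int) := PySem.Str.len_eq w
    have hslice : PySem.List.slice w.toList (some 0) (some (PySem.Str.len s))
        = w.toList.take s.toList.length := by
      rw [hlen]
      simp [PySem.List.slice_to_natCast]
    have hstart : PySem.Str.startswith w s = true ↔ s.toList <+: w.toList := by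
      rw [PySem.Str.startswith_eq, PySem.Chars.startswith_iff]
    by_cases hgt : PySem.Str.len s > PySem.Str.len w
    · -- s longer than w: A skips; s ≠ w and w does not start with s
      have hne : w ≠ s := by
        intro h; subst h; omega
      have hnpfx : ¬ PySem.Str.startswith w s = true := by
        rw [hstart]
        intro hpfx
        have := hpfx.length_le
        omega
      rw [if_pos hgt, ih (k + 1) hrest, PySem.List.index?_cons_of_ne rest hne]
      cases hidx : PySem.List.index? rest s with
      | some i => simp only [Option.map_some]; push_cast; ring
      | none => simp only [Option.map_none]; simp [PySem.Str.startswith_eq] at hnpfx; simp [hnpfx]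
    · rw [if_neg hgt]
      by_cases hpre : s.toList = PySem.List.slice w.toList (some 0) (some (PySem.Str.len s))
      · -- s is a prefix of w
        rw [if_pos hpre]
        rw [hslice] at hpre
        have hpfx : s.toList <+: w.toList := by
          rw [List.prefix_iff_eq_take]; exact hpre
        by_cases heq : PySem.Str.len s = PySem.Str.len w
        · -- exact match: return the index
          have hsw : s = w := by
            apply String.toList_inj.mp
            have : s.toList.length = w.toList.length := by omega
            rw [hpre, this, List.take_length]
          rw [if_pos heq, hsw, PySem.List.index?_cons_self]
          simp
        · -- proper prefix: return 10; s occurs nowhere in the word list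
          rw [if_neg heq]
          have hne : w ≠ s := by
            intro h; subst h; omega
          have hnotmem : s ∉ rest := fun hmem => ((hw s hmem).2 hpfx).elim
          have hidx : PySem.List.index? (w :: rest) s = none := by
            rw [PySem.List.index?_eq_none_iff]
            simp [hne.symm, hnotmem]
          rw [hidx]
          have hsw : PySem.Chars.startswith w.toList s.toList = true := by
            rw [← PySem.Str.startswith_eq]; exact hstart.mpr hpfx
          simp [hsw]
      · -- no match at w: A skips; s ≠ w and w does not start with s
        rw [if_neg hpre]
        rw [hslice] at hpre
        have hnpfx : ¬ PySem.Str.startswith w s = true := by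
          rw [hstart]
          intro hpfx
          rw [List.prefix_iff_eq_take] at hpfx
          exact hpre hpfx
        have hne : w ≠ s := by
          intro h; subst h
          exact hpre (by simp)
        rw [ih (k + 1) hrest, PySem.List.index?_cons_of_ne rest hne]
        cases hidx : PySem.List.index? rest s with
        | some i => simp only [Option.map_some]; push_cast; ring
        | none => simp only [Option.map_none]; simp [PySem.Str.startswith_eq] at hnpfx; simp [hnpfx]

-- ===== VERDICT (by name: the statement is the Claim_ definition above) =====
theorem check_char_in_number_spec : Claim_equal_check_char_in_number := by
  intro s _
  unfold Spec_check_char_in_number check_char_in_number check_char_in_number_alt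
  rw [pvLoop_eq s pvNumbersA 0 pvNoPrefix]
  have hAB : pvNumbersB = pvNumbersA := rfl
  rw [hAB]
  by_cases hmem : s ∈ pvNumbersA
  · rw [if_pos hmem]
    obtain ⟨i, hi⟩ := Option.isSome_iff_exists.mp
      ((PySem.List.index?_isSome_iff pvNumbersA s).mpr hmem)
    rw [hi]
    simp
  · rw [if_neg hmem]
    have hnone : PySem.List.index? pvNumbersA s = none := by
      rw [PySem.List.index?_eq_none_iff]; exact hmem
    rw [hnone]
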